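-- pv_equiv track=rewrite | github.com/tmfrlrkvlek/algorithm_python | Baekjoon/Successful/python/2716.py | solve
-- ===== SOURCE A (Python) =====
-- def solve(tree) :
--     maxDepth = 0
--     currentDepth = 0
--     for i in tree :
--         if i == '[' :
--             currentDepth += 1
--         else :
--             currentDepth -= 1
--         maxDepth = max(currentDepth, maxDepth)
--     return 2**maxDepth
-- ===== SOURCE B (Python) =====
-- def solve(tree):
--     # Divide and conquer: for a segment tree[lo:hi] compute the pair
--     # (total, best) where total = sum of its +1/-1 bracket deltas and
--     # best = max prefix sum over all prefixes of the segment (incl. empty).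
--     # Halves combine by (tl + tr, max(bl, tl + br)); the answer is
--     # 2 ** best of the whole string (best >= 0, so == A's running max).
--     def go(lo, hi):
--         if hi - lo == 0:
--             return (0, 0)
--         if hi - lo == 1:
--             d = 1 if tree[lo] == '[' else -1
--             return (d, max(0, d))
--         mid = (lo + hi) // 2
--         tl, bl = go(lo, mid)
--         tr, br = go(mid, hi)
--         return (tl + tr, max(bl, tl + br))
--     return 2 ** go(0, len(tree))[1]
-- ===== Notes on version B (the rewrite author's own statement) =====
-- stated objective: alternative
-- what changed: B replaces A's single left-to-right scan with a running maximum by a divide-and-conquer recursion that computes for each half the pair (total delta, max prefix sum) and merges them with the segment-tree combine (tl+tr, max(bl, tl+br)).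
import Mathlib
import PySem

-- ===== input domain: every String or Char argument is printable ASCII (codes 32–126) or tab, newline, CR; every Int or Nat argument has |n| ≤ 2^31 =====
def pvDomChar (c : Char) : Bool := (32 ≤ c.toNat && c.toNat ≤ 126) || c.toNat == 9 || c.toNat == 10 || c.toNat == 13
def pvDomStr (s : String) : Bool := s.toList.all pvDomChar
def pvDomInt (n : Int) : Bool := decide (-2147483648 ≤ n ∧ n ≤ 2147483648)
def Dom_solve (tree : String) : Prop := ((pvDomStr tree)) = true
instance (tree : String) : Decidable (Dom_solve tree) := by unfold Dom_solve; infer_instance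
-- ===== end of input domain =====

-- B replaces A's linear scan with a divide-and-conquer on halves combining (total delta, max prefix sum) pairs; same O(n) cost (objective: alternative).


-- ===== PORT A =====
-- loop state (maxDepth, currentDepth); maxDepth starts at 0 and only grows, so `.toNat` is exact
def stepA (p : Int × Int) (i : Char) : Int × Int :=
  let c := if i = '[' then p.2 + 1 else p.2 - 1
  (max c p.1, c)

def solve (tree : String) : Int :=
  let st := tree.toList.foldl stepA (0, 0)
  2 ^ st.1.toNat

-- ===== PORT B =====
-- go on a segment (here: the sub-list) returns (total delta, max prefix sum incl. empty);
-- `tree[lo:mid]`/`tree[mid:hi]` become take/drop at the midpoint. best ≥ 0, so `.toNat` is exact.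
-- structural recursion on fuel = length (the halves are strictly shorter, so fuel never runs out;
-- the fuel-exhausted branch is unreachable)
def goB : Nat → List Char → Int × Int
  | _, [] => (0, 0)
  | _, [c] =>
      let d : Int := if c = '[' then 1 else -1
      (d, max 0 d)
  | 0, _ :: _ :: _ => (0, 0)
  | fuel + 1, x :: y :: rest =>
      let l := x :: y :: rest
      let pl := goB fuel (l.take (l.length / 2))
      let pr := goB fuel (l.drop (l.length / 2))
      (pl.1 + pr.1, max pl.2 (pl.1 + pr.2))

def solve_alt (tree : String) : Int :=
  2 ^ ((goB tree.toList.length tree.toList).2).toNat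

-- ===== PRECONDITION & SPEC =====
def Spec_solve (tree : String) (out : Int) : Prop := out = solve_alt tree
instance (tree : String) (out : Int) : Decidable (Spec_solve tree out) := by unfold Spec_solve; infer_instance

-- ===== CLAIM (what is proved, stated in full; the proofs are below) =====
def Claim_equal_solve : Prop := ∀ (tree : String), Dom_solve tree → Spec_solve tree (solve tree)

-- ===== LEMMAS AND PROOFS =====

def pvDelta (c : Char) : Int := if c = '[' then 1 else -1

def msum : List Char → Int
  | [] => 0
  | x :: xs => pvDelta x + msum xs

/-- max prefix sum (over all prefixes, including the empty one) of the delta sequence -/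
def mpre : List Char → Int
  | [] => 0
  | x :: xs => max 0 (pvDelta x + mpre xs)

theorem mpre_nonneg (l : List Char) : 0 ≤ mpre l := by
  cases l with
  | nil => simp [mpre]
  | cons x xs => simp [mpre]

theorem msum_append (a b : List Char) : msum (a ++ b) = msum a + msum b := by
  induction a with
  | nil => simp [msum]
  | cons x xs ih => simp [msum, ih]; ring

theorem mpre_append (a b : List Char) :
    mpre (a ++ b) = max (mpre a) (msum a + mpre b) := by
  induction a with
  | nil => have := mpre_nonneg b; simp only [List.nil_append, mpre, msum]; omega
  | cons x xs ih =>
    simp only [List.cons_append, mpre, msum, ih]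
    omega

theorem goB_spec : ∀ (f : Nat) (l : List Char), l.length ≤ f + 1 → goB f l = (msum l, mpre l) := by
  intro f
  induction f with
  | zero =>
    intro l hl
    match l, hl with
    | [], _ => rfl
    | [c], _ => simp [goB, msum, mpre, pvDelta]
  | succ f ih =>
    intro l hl
    match l with
    | [] => rfl
    | [c] => simp [goB, msum, mpre, pvDelta]
    | x :: y :: rest =>
      have hlen : (x :: y :: rest).length = rest.length + 2 := by simp
      rw [goB]
      rw [ih _ (by simp only [List.length_take, hlen] at *; omega),
          ih _ (by simp only [List.length_drop, hlen] at *; omega)]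
      have h := List.take_append_drop ((x :: y :: rest).length / 2) (x :: y :: rest)
      refine Prod.ext ?_ ?_
      · show msum _ + msum _ = msum (x :: y :: rest)
        rw [← msum_append, h]
      · show max (mpre _) (msum _ + mpre _) = mpre (x :: y :: rest)
        rw [← mpre_append, h]

theorem foldA_eq (l : List Char) : ∀ m c : Int, c ≤ m →
    (l.foldl stepA (m, c)).1 = max m (c + mpre l) := by
  induction l with
  | nil => intro m c h; simp [mpre]; omega
  | cons x xs ih =>
    intro m c h
    rw [List.foldl_cons]
    have hp := mpre_nonneg xs
    by_cases hx : x = '['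
    · have hs : stepA (m, c) x = (max (c + 1) m, c + 1) := by simp [stepA, hx]
      rw [hs, ih _ _ (le_max_left _ _)]
      simp only [mpre, pvDelta, if_pos hx]
      omega
    · have hs : stepA (m, c) x = (max (c - 1) m, c - 1) := by simp [stepA, hx]
      rw [hs, ih _ _ (le_max_left _ _)]
      simp only [mpre, pvDelta, if_neg hx]
      omega

-- ===== VERDICT (by name: the statement is the Claim_ definition above) =====
theorem solve_spec : Claim_equal_solve := by
  intro tree _
  show solve tree = solve_alt tree
  simp only [solve, solve_alt, goB_spec tree.toList.length tree.toList (Nat.le_succ _), foldA_eq tree.toList 0 0 le_rfl]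
  have := mpre_nonneg tree.toList
  congr 1
  omega
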